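-- pv_equiv track=rewrite | github.com/wwwyo/programing_for_puzzled | pftp/Puzzle9/practice/4.py | pickupOnlyTalent
-- ===== SOURCE A (Python) =====
-- def pickupOnlyTalent(candList, candTalents, talentList):
--     only_candList = []
--     optimize_talentList = []
--     for talent in talentList:
--         cnt = 0
--         for j in range(len(candTalents)):
--             if talent in candTalents[j]:
--                 cnt += 1
--                 cand_idx = j
--         if cnt == 1:
--             only_candList.append(candList[cand_idx])
--         else:
--             optimize_talentList.append(talent)
--     return only_candList, optimize_talentList
-- ===== SOURCE B (Python) =====
-- def pickupOnlyTalent(candList, candTalents, talentList):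
--     # one pass: talent -> (number of candidates possessing it, index of last such candidate)
--     info = {}
--     for j, talents in enumerate(candTalents):
--         for t in set(talents):
--             c = info.get(t, (0, 0))[0]
--             info[t] = (c + 1, j)
--     only_candList = []
--     optimize_talentList = []
--     for t in talentList:
--         c, j = info.get(t, (0, 0))
--         if c == 1:
--             only_candList.append(candList[j])
--         else:
--             optimize_talentList.append(t)
--     return only_candList, optimize_talentList
-- ===== Notes on version B (the rewrite author's own statement) =====
-- stated objective: faster
-- what changed: replaced the per-talent rescan of all candidates by a single indexing pass that builds a dict talent -> (candidate count, last candidate index), then one flat pass over talentList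
import Mathlib
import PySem

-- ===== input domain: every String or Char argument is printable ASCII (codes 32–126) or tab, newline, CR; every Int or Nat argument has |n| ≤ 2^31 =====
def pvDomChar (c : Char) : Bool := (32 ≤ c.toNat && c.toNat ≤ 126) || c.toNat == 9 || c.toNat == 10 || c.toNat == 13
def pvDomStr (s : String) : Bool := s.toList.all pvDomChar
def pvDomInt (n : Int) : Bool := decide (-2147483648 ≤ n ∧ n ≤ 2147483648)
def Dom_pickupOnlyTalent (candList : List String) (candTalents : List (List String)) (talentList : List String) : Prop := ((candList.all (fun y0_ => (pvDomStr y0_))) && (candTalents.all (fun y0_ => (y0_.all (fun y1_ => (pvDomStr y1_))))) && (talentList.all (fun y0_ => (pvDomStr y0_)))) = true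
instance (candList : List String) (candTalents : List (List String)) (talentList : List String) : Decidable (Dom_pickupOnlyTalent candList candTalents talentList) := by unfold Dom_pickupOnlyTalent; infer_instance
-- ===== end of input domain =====

-- B replaces A's per-talent rescan of all candidates by one indexing pass building a
-- dict talent -> (candidate count, last candidate index), then a single pass over talentList.


-- ===== PORT A =====
-- inner loop 'for j in range(len(candTalents))': state (j, cnt, cand_idx); cand_idx starts
-- unset in Python and is read only when cnt == 1, so 0 is an exact stand-in.
def pickupOnlyTalent (candList : List String) (candTalents : List (List String)) (talentList : List String) : List String × List String :=
  talentList.foldl (fun acc talent =>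
    let r := candTalents.foldl (fun (p : Nat × Nat × Nat) c =>
        (p.1 + 1, if talent ∈ c then (p.2.1 + 1, p.1) else p.2)) (0, 0, 0)
    if r.2.1 = 1 then
      (acc.1 ++ [PySem.List.pyGetD candList (r.2.2 : Int) ""], acc.2)  -- candList[cand_idx]; in range under Pre_
    else
      (acc.1, acc.2 ++ [talent])) ([], [])

-- ===== PORT B =====
-- per-candidate update: for t in set(talents): info[t] = (info.get(t,(0,0))[0] + 1, j)
def pvUpdCand (d : PySem.Dict String (Nat × Nat)) (j : Nat) (talents : List String) : PySem.Dict String (Nat × Nat) :=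
  (PySem.Set.ofList talents).foldl (fun d t => d.insert t ((d.getD t (0, 0)).1 + 1, j)) d

-- 'for j, talents in enumerate(candTalents)': state (j, info)
def pvBuildInfo (candTalents : List (List String)) : Nat × PySem.Dict String (Nat × Nat) :=
  candTalents.foldl (fun s talents => (s.1 + 1, pvUpdCand s.2 s.1 talents)) (0, PySem.Dict.empty)

def pickupOnlyTalent_alt (candList : List String) (candTalents : List (List String)) (talentList : List String) : List String × List String :=
  let info := (pvBuildInfo candTalents).2
  talentList.foldl (fun acc t =>
    let cj := info.getD t (0, 0)
    if cj.1 = 1 then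
      (acc.1 ++ [PySem.List.pyGetD candList (cj.2 : Int) ""], acc.2)  -- candList[j]; in range under Pre_
    else
      (acc.1, acc.2 ++ [t])) ([], [])

-- ===== PRECONDITION & SPEC =====
-- Pre_ excludes exactly the inputs where Python A raises IndexError: a talent possessed by
-- exactly one candidate whose index is >= len(candList) (both Pythons raise there).
def Pre_pickupOnlyTalent (candList : List String) (candTalents : List (List String)) (talentList : List String) : Prop :=
  ∀ t ∈ talentList, candTalents.countP (fun c => decide (t ∈ c)) = 1 →
    candTalents.findIdx (fun c => decide (t ∈ c)) < candList.length
instance (candList : List String) (candTalents : List (List String)) (talentList : List String) : Decidable (Pre_pickupOnlyTalent candList candTalents talentList) := by unfold Pre_pickupOnlyTalent; infer_instance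

def pvWitness_pickupOnlyTalent : List String × List (List String) × List String :=
  (["ann", "bob"], [["sing"], ["sing", "dance"]], ["sing", "dance", "act"])

def Spec_pickupOnlyTalent (candList : List String) (candTalents : List (List String)) (talentList : List String) (out : List String × List String) : Prop := out = pickupOnlyTalent_alt candList candTalents talentList
instance (candList : List String) (candTalents : List (List String)) (talentList : List String) (out : List String × List String) : Decidable (Spec_pickupOnlyTalent candList candTalents talentList out) := by unfold Spec_pickupOnlyTalent; infer_instance

-- ===== CLAIM (what is proved, stated in full; the proofs are below) =====
def Claim_equal_pickupOnlyTalent : Prop := ∀ (candList : List String) (candTalents : List (List String)) (talentList : List String), Dom_pickupOnlyTalent candList candTalents talentList → Pre_pickupOnlyTalent candList candTalents talentList → Spec_pickupOnlyTalent candList candTalents talentList (pickupOnlyTalent candList candTalents talentList)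

-- ===== LEMMAS AND PROOFS =====

-- one candidate's update, seen through getD
lemma pvUpdCand_getD (d : PySem.Dict String (Nat × Nat)) (j : Nat) (talents : List String) (t : String) :
    (pvUpdCand d j talents).getD t (0, 0) =
      if t ∈ talents then ((d.getD t (0, 0)).1 + 1, j) else d.getD t (0, 0) := by
  unfold pvUpdCand
  have h : ∀ (l : List String), l.Nodup → ∀ (d : PySem.Dict String (Nat × Nat)),
      (l.foldl (fun d t => d.insert t ((d.getD t (0, 0)).1 + 1, j)) d).getD t (0, 0) =
        if t ∈ l then ((d.getD t (0, 0)).1 + 1, j) else d.getD t (0, 0) := by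
    intro l
    induction l with
    | nil => intro _ d; simp
    | cons x xs ih =>
      intro hnd d
      simp only [List.nodup_cons] at hnd
      simp only [List.foldl_cons, ih hnd.2, List.mem_cons]
      by_cases hx : t = x
      · subst hx
        have : t ∉ xs := hnd.1
        simp [this, PySem.Dict.getD_insert_self]
      · by_cases hm : t ∈ xs <;> simp [hx, hm, PySem.Dict.getD_insert]
  rw [h (PySem.Set.ofList talents) (PySem.Set.nodup_ofList talents) d]
  simp [PySem.Set.mem_ofList]

-- A's inner loop counter j ends at the number of candidates scanned
lemma pvInnerA_fst (t : String) (ct : List (List String)) :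
    ∀ (p : Nat × Nat × Nat),
      (ct.foldl (fun (p : Nat × Nat × Nat) c =>
          (p.1 + 1, if t ∈ c then (p.2.1 + 1, p.1) else p.2)) p).1 = p.1 + ct.length := by
  induction ct with
  | nil => simp
  | cons c cs ih => intro p; simp only [List.foldl_cons, ih, List.length_cons]; omega

-- the built dict agrees, talent by talent, with A's inner counting loop
lemma pvBuildInfo_spec (t : String) (candTalents : List (List String)) :
    (pvBuildInfo candTalents).1 = candTalents.length ∧
    (pvBuildInfo candTalents).2.getD t (0, 0) =
      (candTalents.foldl (fun (p : Nat × Nat × Nat) c =>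
          (p.1 + 1, if t ∈ c then (p.2.1 + 1, p.1) else p.2)) (0, 0, 0)).2 := by
  induction candTalents using List.reverseRecOn with
  | nil => simp [pvBuildInfo]
  | append_singleton ct c ih =>
    obtain ⟨h1, h2⟩ := ih
    unfold pvBuildInfo at *
    simp only [List.foldl_append, List.foldl_cons, List.foldl_nil, List.length_append,
      List.length_cons, List.length_nil]
    constructor
    · omega
    · rw [pvUpdCand_getD, h1, h2]
      have hf := pvInnerA_fst t ct (0, 0, 0)
      by_cases hm : t ∈ c <;> simp [hm, hf]

-- ===== VERDICT (by name: the statement is the Claim_ definition above) =====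
theorem pickupOnlyTalent_spec : Claim_equal_pickupOnlyTalent := by
  intro candList candTalents talentList _ _
  unfold Spec_pickupOnlyTalent pickupOnlyTalent pickupOnlyTalent_alt
  have hstep : ∀ (acc : List String × List String) (t : String),
      (let r := candTalents.foldl (fun (p : Nat × Nat × Nat) c =>
          (p.1 + 1, if t ∈ c then (p.2.1 + 1, p.1) else p.2)) (0, 0, 0)
       if r.2.1 = 1 then (acc.1 ++ [PySem.List.pyGetD candList (r.2.2 : Int) ""], acc.2)
       else (acc.1, acc.2 ++ [t])) =
      (let cj := (pvBuildInfo candTalents).2.getD t (0, 0)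
       if cj.1 = 1 then (acc.1 ++ [PySem.List.pyGetD candList (cj.2 : Int) ""], acc.2)
       else (acc.1, acc.2 ++ [t])) := by
    intro acc t
    rw [(pvBuildInfo_spec t candTalents).2]
  simp only [hstep]
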